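-- pv_equiv track=rewrite | github.com/Zhanna2603/GOA-projects | Day 33/Homework/codewars6.py | kebabize
-- ===== SOURCE A (Python) =====
-- def kebabize(st):
--     res = ""
--     first_char = st[0].lower()
--     st = st[1:]
--     st = first_char + st
--     for char in st:
--         if char.isdigit():
--             continue
--         if char.isupper():
--             res +="-" + char.lower()
--         else:
--             res += char
--     if res != "":
--         if res[0] == "-":
--             return res[1:]
--     return res
-- ===== SOURCE B (Python) =====
-- def kebabize(st):
--     st = st[0].lower() + st[1:]
--     # pass 1: drop all digits
--     s = [c for c in st if not c.isdigit()]
--     # pass 2: cut the digit-free list into segments, a new segment before each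
--     # uppercase letter; lowercase each segment's first character
--     words = []
--     while s:
--         j = 1
--         while j < len(s) and not s[j].isupper():
--             j += 1
--         words.append(s[0].lower() + ''.join(s[1:j]))
--         s = s[j:]
--     # pass 3: join the segments, dropping the single leading dash that appears
--     # when the first kept character is itself a '-'
--     return '-'.join(words).removeprefix('-')
-- ===== Notes on version B (the rewrite author's own statement) =====
-- stated objective: alternative
-- what changed: B works in three staged passes (filter out all digits, then cut the digit-free list into segments before each uppercase letter lowercasing segment heads, then '-'.join the segments and drop a single leading dash), instead of A's single pass that emits a dash inline before each uppercase letter and finally strips a leading dash from the accumulated string.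
import Mathlib
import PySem

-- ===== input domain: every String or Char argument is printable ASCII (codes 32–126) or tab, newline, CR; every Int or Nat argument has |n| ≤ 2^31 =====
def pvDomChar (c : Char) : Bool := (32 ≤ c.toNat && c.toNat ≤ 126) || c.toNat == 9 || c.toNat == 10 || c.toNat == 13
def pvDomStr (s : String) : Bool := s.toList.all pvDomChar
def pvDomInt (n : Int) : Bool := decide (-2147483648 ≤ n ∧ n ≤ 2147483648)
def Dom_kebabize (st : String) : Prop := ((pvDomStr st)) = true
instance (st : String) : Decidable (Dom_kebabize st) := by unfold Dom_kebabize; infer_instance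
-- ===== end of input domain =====

-- B does the job in three staged passes (filter digits, cut into segments before each
-- uppercase letter, join with '-' and drop one leading dash) instead of A's single pass
-- with inline dash emission (objective: alternative algorithmic decomposition).

-- ===== PORT A =====
-- the for-loop of A: res accumulates; digits skipped, uppercase → "-" + lowered, else the char
def kebALoop (res : List Char) (l : List Char) : List Char :=
  match l with
  | [] => res
  | c :: r =>
    if PySem.Chars.isdigit c then kebALoop res r
    else if PySem.Chars.isupper c then kebALoop (res ++ ['-', PySem.Chars.lowerChar c]) r
    else kebALoop (res ++ [c]) r

def kebabize (st : String) : String :=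
  match st.toList with
  | [] => ""          -- st[0] raises IndexError here; excluded by Pre_kebabize
  | c0 :: rest =>
    let res := kebALoop [] (PySem.Chars.lowerChar c0 :: rest)
    String.ofList (if res.head? = some '-' then res.tail else res)

-- ===== PORT B =====
-- B's inner while loop: advance j over the non-uppercase tail; returns (s[1:j], s[j:])
def kebScan : List Char → List Char × List Char
  | [] => ([], [])
  | d :: r =>
    if PySem.Chars.isupper d then ([], d :: r)
    else (d :: (kebScan r).1, (kebScan r).2)

-- B's outer while loop: peel one segment (head lowered) at a time;
-- the fuel (initially the list's length, which always suffices) only makes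
-- the same computation structurally terminating
def kebSplitF : Nat → List Char → List (List Char)
  | 0, _ => []
  | _ + 1, [] => []
  | n + 1, c :: r =>
    (PySem.Chars.lowerChar c :: (kebScan r).1) :: kebSplitF n (kebScan r).2

def kebSplit (s : List Char) : List (List Char) := kebSplitF s.length s

def kebabize_alt (st : String) : String :=
  match st.toList with
  | [] => ""          -- st[0] raises IndexError here; excluded by Pre_kebabize
  | c0 :: rest =>
    let s := (PySem.Chars.lowerChar c0 :: rest).filter (fun c => !PySem.Chars.isdigit c)
    let j := PySem.Chars.join ['-'] (kebSplit s)
    String.ofList (if j.head? = some '-' then j.tail else j)  -- removeprefix('-')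

-- ===== PRECONDITION & SPEC =====
-- A evaluates st[0], which raises IndexError on the empty string: Pre_ excludes exactly that input.
def Pre_kebabize (st : String) : Prop := st ≠ ""
instance (st : String) : Decidable (Pre_kebabize st) := by unfold Pre_kebabize; infer_instance
def pvWitness_kebabize : String := "kebAbCase5X"

def Spec_kebabize (st : String) (out : String) : Prop := out = kebabize_alt st
instance (st : String) (out : String) : Decidable (Spec_kebabize st out) := by
  unfold Spec_kebabize; infer_instance

-- ===== CLAIM (what is proved, stated in full; the proofs are below) =====
def Claim_equal_kebabize : Prop :=
  ∀ (st : String), Dom_kebabize st → Pre_kebabize st → Spec_kebabize st (kebabize st)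

-- ===== LEMMAS AND PROOFS =====

-- what A emits per character
def kebEmit (c : Char) : List Char :=
  if PySem.Chars.isdigit c then []
  else if PySem.Chars.isupper c then ['-', PySem.Chars.lowerChar c]
  else [c]

def kebE (l : List Char) : List Char := (l.map kebEmit).flatten

theorem kebALoop_eq (l : List Char) : ∀ res, kebALoop res l = res ++ kebE l := by
  induction l with
  | nil => intro res; simp [kebALoop, kebE]
  | cons c r ih =>
    intro res
    by_cases h1 : PySem.Chars.isdigit c
    · simp [kebALoop, kebE, kebEmit, h1, ih]
    · by_cases h2 : PySem.Chars.isupper c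
      · simp [kebALoop, kebE, kebEmit, h1, h2, ih]
      · simp [kebALoop, kebE, kebEmit, h1, h2, ih]

-- proof-side fragment splitter on the UNFILTERED list (skips digits inline);
-- used to mediate between A's inline emission and B's staged split
def kebFrags (cur : List Char) : List Char → List (List Char)
  | [] => [cur]
  | c :: r =>
    if PySem.Chars.isdigit c then kebFrags cur r
    else if PySem.Chars.isupper c then cur :: kebFrags [PySem.Chars.lowerChar c] r
    else kebFrags (cur ++ [c]) r

def kebFrag0 : List Char → List (List Char)
  | [] => []
  | c :: r =>
    if PySem.Chars.isdigit c then kebFrag0 r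
    else if PySem.Chars.isupper c then kebFrags [PySem.Chars.lowerChar c] r
    else kebFrags [c] r

theorem kebFrags_ne_nil (l : List Char) : ∀ cur, kebFrags cur l ≠ [] := by
  induction l with
  | nil => intro cur; simp [kebFrags]
  | cons c r ih =>
    intro cur
    simp only [kebFrags]
    split_ifs <;> simp [ih]

theorem keb_lower_not_upper (c : Char) (h : PySem.Chars.isupper c = false) :
    PySem.Chars.lowerChar c = c := by
  unfold PySem.Chars.lowerChar
  simp [h]

-- kebFrags / kebFrag0 ignore digits: filtering them out first changes nothing
theorem kebFrags_filter (l : List Char) :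
    ∀ cur, kebFrags cur (l.filter (fun c => !PySem.Chars.isdigit c)) = kebFrags cur l := by
  induction l with
  | nil => intro cur; simp
  | cons c r ih =>
    intro cur
    by_cases h1 : PySem.Chars.isdigit c
    · simp only [List.filter_cons, h1]
      simpa [kebFrags, h1] using ih cur
    · simp only [List.filter_cons, h1]
      by_cases h2 : PySem.Chars.isupper c
      · simp [kebFrags, h1, h2, ih]
      · simp [kebFrags, h1, h2, ih]

theorem kebFrag0_filter (l : List Char) :
    kebFrag0 (l.filter (fun c => !PySem.Chars.isdigit c)) = kebFrag0 l := by
  induction l with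
  | nil => simp
  | cons c r ih =>
    by_cases h1 : PySem.Chars.isdigit c
    · simp only [List.filter_cons, h1]
      simpa [kebFrag0, h1] using ih
    · simp only [List.filter_cons, h1]
      by_cases h2 : PySem.Chars.isupper c
      · simp [kebFrag0, h1, h2, kebFrags_filter]
      · simp [kebFrag0, h1, h2, kebFrags_filter]

theorem kebScan_len (r : List Char) : (kebScan r).2.length ≤ r.length := by
  induction r with
  | nil => simp [kebScan]
  | cons d r ih =>
    by_cases h : PySem.Chars.isupper d
    · simp [kebScan, h]
    · simp only [kebScan, if_neg h]
      simp only [List.length_cons]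
      omega

theorem kebSplitF_congr (n : Nat) :
    ∀ (m : Nat) (s : List Char), s.length ≤ n → s.length ≤ m →
      kebSplitF n s = kebSplitF m s := by
  induction n with
  | zero =>
    intro m s hn _
    have : s = [] := List.length_eq_zero_iff.mp (Nat.le_zero.mp hn)
    subst this
    cases m <;> simp [kebSplitF]
  | succ n ih =>
    intro m s hn hm
    cases s with
    | nil => cases m <;> simp [kebSplitF]
    | cons c r =>
      cases m with
      | zero => simp at hm
      | succ m' =>
        simp only [kebSplitF]
        have hr : (kebScan r).2.length ≤ r.length := kebScan_len r
        have h1 : (kebScan r).2.length ≤ n := by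
          simp only [List.length_cons] at hn; omega
        have h2 : (kebScan r).2.length ≤ m' := by
          simp only [List.length_cons] at hm; omega
        rw [ih m' (kebScan r).2 h1 h2]

theorem kebSplit_nil : kebSplit [] = [] := rfl

theorem kebSplit_cons (c : Char) (r : List Char) :
    kebSplit (c :: r) =
      (PySem.Chars.lowerChar c :: (kebScan r).1) :: kebSplit (kebScan r).2 := by
  simp only [kebSplit, List.length_cons, kebSplitF]
  rw [kebSplitF_congr r.length (kebScan r).2.length (kebScan r).2 (kebScan_len r) le_rfl]

-- on a digit-free list, kebFrags peels exactly one kebScan segment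
theorem kebFrags_scan (r : List Char)
    (hdf : ∀ c ∈ r, PySem.Chars.isdigit c = false) :
    ∀ cur, kebFrags cur r = (cur ++ (kebScan r).1) :: kebSplit (kebScan r).2 := by
  induction r with
  | nil => intro cur; simp [kebFrags, kebScan, kebSplit_nil]
  | cons d r ih =>
    intro cur
    have hd : PySem.Chars.isdigit d = false := hdf d (by simp)
    have hdf' : ∀ c ∈ r, PySem.Chars.isdigit c = false := fun c hc => hdf c (by simp [hc])
    by_cases h2 : PySem.Chars.isupper d
    · rw [show kebFrags cur (d :: r) = cur :: kebFrags [PySem.Chars.lowerChar d] r by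
            simp [kebFrags, hd, h2],
          ih hdf' [PySem.Chars.lowerChar d]]
      simp [kebScan, h2, kebSplit_cons]
    · rw [show kebFrags cur (d :: r) = kebFrags (cur ++ [d]) r by
            simp [kebFrags, hd, h2],
          ih hdf' (cur ++ [d])]
      simp [kebScan, h2]

-- B's staged split equals the mediating splitter on digit-free input
theorem kebSplit_eq_frag0 (s : List Char)
    (hdf : ∀ c ∈ s, PySem.Chars.isdigit c = false) :
    kebSplit s = kebFrag0 s := by
  cases s with
  | nil => simp [kebSplit_nil, kebFrag0]
  | cons c r =>
    have hc : PySem.Chars.isdigit c = false := hdf c (by simp)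
    have hdf' : ∀ d ∈ r, PySem.Chars.isdigit d = false := fun d hd => hdf d (by simp [hd])
    by_cases h2 : PySem.Chars.isupper c
    · rw [show kebFrag0 (c :: r) = kebFrags [PySem.Chars.lowerChar c] r by
            simp [kebFrag0, hc, h2],
          kebFrags_scan r hdf' [PySem.Chars.lowerChar c]]
      simp [kebSplit_cons]
    · rw [show kebFrag0 (c :: r) = kebFrags [c] r by simp [kebFrag0, hc, h2],
          kebFrags_scan r hdf' [c]]
      simp [kebSplit_cons, keb_lower_not_upper c (by simpa using h2)]

theorem kebJoin_frags (l : List Char) :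
    ∀ cur, cur ≠ [] →
      PySem.Chars.join ['-'] (kebFrags cur l) = cur ++ kebE l := by
  induction l with
  | nil => intro cur h; simp [kebFrags, kebE, PySem.Chars.join_singleton]
  | cons c r ih =>
    intro cur h
    simp only [kebFrags, kebE, List.map_cons, List.flatten_cons, kebEmit]
    split_ifs with h1 h2
    · simpa [kebE] using ih cur h
    · obtain ⟨w, ws, hw⟩ : ∃ w ws, kebFrags [PySem.Chars.lowerChar c] r = w :: ws := by
        cases hfr : kebFrags [PySem.Chars.lowerChar c] r with
        | nil => exact absurd hfr (kebFrags_ne_nil r _)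
        | cons w ws => exact ⟨w, ws, rfl⟩
      have := ih [PySem.Chars.lowerChar c] (by simp)
      rw [hw] at this ⊢
      rw [PySem.Chars.join_cons_cons, this]
      simp [kebE]
    · rw [ih (cur ++ [c]) (by simp)]
      simp [kebE]

-- the first character A keeps (digits skipped)
def kebFirstKept? (l : List Char) : Option Char :=
  (l.filter (fun c => !PySem.Chars.isdigit c)).head?

theorem kebE_none (l : List Char) (h : kebFirstKept? l = none) :
    kebE l = [] ∧ kebFrag0 l = [] := by
  induction l with
  | nil => simp [kebE, kebFrag0]
  | cons c r ih =>
    by_cases h1 : PySem.Chars.isdigit c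
    · have hr : kebFirstKept? r = none := by
        simpa [kebFirstKept?, List.filter_cons, h1] using h
      have := ih hr
      simp [kebE, kebFrag0, kebEmit, h1, this.2, kebE] at *
      simpa [kebE, kebFrag0, h1] using this
    · exfalso
      simp [kebFirstKept?, h1] at h

theorem kebE_some (l : List Char) (c : Char) (h : kebFirstKept? l = some c) :
    (PySem.Chars.isupper c = true →
        kebE l = '-' :: PySem.Chars.join ['-'] (kebFrag0 l) ∧
        (PySem.Chars.join ['-'] (kebFrag0 l)).head? = some (PySem.Chars.lowerChar c)) ∧
    (PySem.Chars.isupper c = false →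
        kebE l = PySem.Chars.join ['-'] (kebFrag0 l) ∧
        (PySem.Chars.join ['-'] (kebFrag0 l)).head? = some c) := by
  induction l with
  | nil => simp [kebFirstKept?] at h
  | cons d r ih =>
    by_cases h1 : PySem.Chars.isdigit d
    · have hr : kebFirstKept? r = some c := by
        simpa [kebFirstKept?, List.filter_cons, h1] using h
      have := ih hr
      constructor
      · intro hu
        simpa [kebE, kebFrag0, kebEmit, h1] using this.1 hu
      · intro hu
        simpa [kebE, kebFrag0, kebEmit, h1] using this.2 hu
    · have hdc : d = c := by
        simpa [kebFirstKept?, List.filter_cons, h1] using h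
      subst hdc
      constructor
      · intro hu
        rw [kebFrag0, if_neg (by simp [h1]), if_pos hu,
          kebJoin_frags r [PySem.Chars.lowerChar d] (by simp)]
        simp [kebE, kebEmit, h1, hu]
      · intro hu
        rw [kebFrag0, if_neg (by simp [h1]), if_neg (by simp [hu]),
          kebJoin_frags r [d] (by simp)]
        simp [kebE, kebEmit, h1, hu]

-- bounds of an uppercase character; used below to show lowering never yields '-'
theorem keb_upper_bounds (c : Char) (h : PySem.Chars.isupper c = true) :
    65 ≤ c.toNat ∧ c.toNat ≤ 90 := by
  simp only [PySem.Chars.isupper, Bool.and_eq_true, decide_eq_true_eq] at h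
  exact ⟨h.1, h.2⟩

theorem keb_lower_eq_dash (c : Char) :
    (PySem.Chars.lowerChar c = '-') ↔ (c = '-') := by
  unfold PySem.Chars.lowerChar
  split_ifs with h
  · have hb := keb_upper_bounds c h
    have hv : (Char.ofNat (c.toNat + 32)).toNat = c.toNat + 32 := by
      rw [Char.toNat_ofNat,
        if_pos (show (c.toNat + 32).isValidChar from Or.inl (by omega))]
    constructor
    · intro he
      exfalso
      have h45 : (Char.ofNat (c.toNat + 32)).toNat = 45 := by rw [he]; decide
      omega
    · intro he
      exfalso
      subst he
      have h45 : ('-' : Char).toNat = 45 := rfl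
      omega
  · exact Iff.rfl

-- the common characterisation of both ports on a nonempty input
theorem keb_main (st : String) (c0 : Char) (rest : List Char)
    (hst : st.toList = c0 :: rest) :
    kebabize st = kebabize_alt st := by
  set l := PySem.Chars.lowerChar c0 :: rest with hl
  have hA : kebabize st =
      String.ofList (if (kebE l).head? = some '-' then (kebE l).tail else kebE l) := by
    simp [kebabize, hst, kebALoop_eq]
    rw [hl]
  have hB : kebabize_alt st =
      String.ofList
        (if (PySem.Chars.join ['-'] (kebFrag0 l)).head? = some '-'
         then (PySem.Chars.join ['-'] (kebFrag0 l)).tail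
         else PySem.Chars.join ['-'] (kebFrag0 l)) := by
    have hdf : ∀ c ∈ l.filter (fun c => !PySem.Chars.isdigit c),
        PySem.Chars.isdigit c = false := by
      intro c hc
      simpa using (List.of_mem_filter hc)
    simp only [kebabize_alt, hst]
    rw [show (PySem.Chars.lowerChar c0 :: rest) = l from rfl,
      kebSplit_eq_frag0 _ hdf, kebFrag0_filter]
  rw [hA, hB]
  cases hfk : kebFirstKept? l with
  | none =>
    have hE := kebE_none l hfk
    rw [hE.1, hE.2]
    rfl
  | some c =>
    by_cases hu : PySem.Chars.isupper c
    · have hE := (kebE_some l c hfk).1 hu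
      have hne : PySem.Chars.lowerChar c ≠ '-' := by
        intro h
        have : c = '-' := (keb_lower_eq_dash c).mp h
        subst this
        exact absurd hu (by decide)
      rw [hE.1, hE.2]
      simp [hne]
    · have hE := (kebE_some l c hfk).2 (by simpa using hu)
      rw [hE.1]

-- ===== VERDICT (by name: the statement is the Claim_ definition above) =====
theorem kebabize_spec : Claim_equal_kebabize := by
  intro st _ hpre
  obtain ⟨c0, rest, hst⟩ : ∃ c0 rest, st.toList = c0 :: rest := by
    cases h : st.toList with
    | nil =>
      exact absurd
        (by rw [show st = String.ofList st.toList from String.ofList_toList.symm, h]) hpre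
    | cons a t => exact ⟨a, t, rfl⟩
  exact keb_main st c0 rest hst
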